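-- pv_equiv track=rewrite | github.com/Iverstn/Hunter- | workers/watchlist.py | flatten_watchlist
-- ===== SOURCE A (Python) =====
-- from typing import Any
--
-- def flatten_watchlist(data: dict) -> list[dict[str, Any]]:
--     entries: list[dict[str, Any]] = []
--     for person in data.get("people", []):
--         entries.append(
--             {
--                 "name": person.get("name"),
--                 "entry_type": "person",
--                 "lab": person.get("lab"),
--                 "x_handle": person.get("x_handle"),
--                 "website": person.get("website"),
--                 "youtube_channel": person.get("youtube_channel"),
--             }
--         )
--     for org in data.get("orgs", []):
--         entries.append(
--             {
--                 "name": org.get("name"),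
--                 "entry_type": "org",
--                 "lab": org.get("name"),
--                 "x_handle": org.get("x_handle"),
--                 "website": org.get("website"),
--             }
--         )
--     for feed in data.get("rss_feeds", []):
--         entries.append(
--             {
--                 "name": feed.get("name"),
--                 "entry_type": "rss",
--                 "rss_url": feed.get("url"),
--             }
--         )
--     return entries
-- ===== SOURCE B (Python) =====
-- from typing import Any
--
-- _SECTIONS = [
--     ("people", "person", [("lab", "lab"), ("x_handle", "x_handle"),
--                           ("website", "website"), ("youtube_channel", "youtube_channel")]),
--     ("orgs", "org", [("lab", "name"), ("x_handle", "x_handle"), ("website", "website")]),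
--     ("rss_feeds", "rss", [("rss_url", "url")]),
-- ]
--
-- def flatten_watchlist(data: dict) -> list[dict[str, Any]]:
--     return [
--         {"name": item.get("name"), "entry_type": typ,
--          **{out: item.get(src) for out, src in fields}}
--         for key, typ, fields in _SECTIONS
--         for item in data.get(key, [])
--     ]
-- ===== Notes on version B (the rewrite author's own statement) =====
-- stated objective: idiomatic
-- what changed: Replaces the three bespoke copy-paste loops with a single config-driven comprehension over a static section table (section key, entry type, output-field/source-field pairs).
import Mathlib
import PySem

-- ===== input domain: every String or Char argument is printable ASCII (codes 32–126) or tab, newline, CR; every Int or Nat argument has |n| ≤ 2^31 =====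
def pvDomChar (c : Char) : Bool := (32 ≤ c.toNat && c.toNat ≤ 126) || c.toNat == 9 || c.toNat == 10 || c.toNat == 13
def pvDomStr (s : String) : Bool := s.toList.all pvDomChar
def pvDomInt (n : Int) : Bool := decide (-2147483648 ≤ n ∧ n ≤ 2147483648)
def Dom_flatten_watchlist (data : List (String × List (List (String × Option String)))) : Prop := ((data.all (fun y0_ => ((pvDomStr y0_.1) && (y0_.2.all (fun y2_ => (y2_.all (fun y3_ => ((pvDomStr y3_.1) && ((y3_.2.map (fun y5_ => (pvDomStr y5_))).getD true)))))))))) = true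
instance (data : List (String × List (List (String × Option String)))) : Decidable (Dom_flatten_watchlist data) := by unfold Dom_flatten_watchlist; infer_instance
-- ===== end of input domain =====

-- ===== PORT A =====
-- Header: B replaces A's three copy-pasted per-section loops with one generic pass over a static
-- section table (idiomatic decomposition; same output, same order, same cost).

-- item.get(k) on an item dict whose values may be None: first match, flattened default None
def pvGet (d : List (String × Option String)) (k : String) : Option String :=
  ((PySem.Dict.mk d).get? k).getD none

def flatten_watchlist (data : List (String × List (List (String × Option String)))) : List (List (String × Option String)) :=
  let entries : List (List (String × Option String)) := []
  let entries := ((PySem.Dict.mk data).getD "people" []).foldl (fun acc person =>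
    acc ++ [[("name", pvGet person "name"), ("entry_type", some "person"),
             ("lab", pvGet person "lab"), ("x_handle", pvGet person "x_handle"),
             ("website", pvGet person "website"),
             ("youtube_channel", pvGet person "youtube_channel")]]) entries
  let entries := ((PySem.Dict.mk data).getD "orgs" []).foldl (fun acc org =>
    acc ++ [[("name", pvGet org "name"), ("entry_type", some "org"),
             ("lab", pvGet org "name"), ("x_handle", pvGet org "x_handle"),
             ("website", pvGet org "website")]]) entries
  let entries := ((PySem.Dict.mk data).getD "rss_feeds" []).foldl (fun acc feed =>
    acc ++ [[("name", pvGet feed "name"), ("entry_type", some "rss"),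
             ("rss_url", pvGet feed "url")]]) entries
  entries

-- ===== PORT B =====
-- static section table: (source key in data, entry_type, (output key, source field) pairs)
def pvSections : List (String × String × List (String × String)) :=
  [("people", "person", [("lab", "lab"), ("x_handle", "x_handle"),
                         ("website", "website"), ("youtube_channel", "youtube_channel")]),
   ("orgs", "org", [("lab", "name"), ("x_handle", "x_handle"), ("website", "website")]),
   ("rss_feeds", "rss", [("rss_url", "url")])]

def flatten_watchlist_alt (data : List (String × List (List (String × Option String)))) : List (List (String × Option String)) :=
  pvSections.flatMap (fun sec =>
    ((PySem.Dict.mk data).getD sec.1 []).map (fun item =>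
      ("name", pvGet item "name") :: ("entry_type", some sec.2.1) ::
        sec.2.2.map (fun f => (f.1, pvGet item f.2))))

-- ===== PRECONDITION & SPEC =====
def Spec_flatten_watchlist (data : List (String × List (List (String × Option String)))) (out : List (List (String × Option String))) : Prop := out = flatten_watchlist_alt data
instance (data : List (String × List (List (String × Option String)))) (out : List (List (String × Option String))) : Decidable (Spec_flatten_watchlist data out) := by unfold Spec_flatten_watchlist; infer_instance

-- ===== CLAIM (what is proved, stated in full; the proofs are below) =====
def Claim_equal_flatten_watchlist : Prop := ∀ (data : List (String × List (List (String × Option String)))), Dom_flatten_watchlist data → Spec_flatten_watchlist data (flatten_watchlist data)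

-- ===== LEMMAS AND PROOFS =====

theorem pv_flatten_singleton {α β : Type} (f : α → β) (l : List α) :
    (l.map (fun x => [f x])).flatten = l.map f := by
  induction l <;> simp_all

-- ===== VERDICT (by name: the statement is the Claim_ definition above) =====
theorem flatten_watchlist_spec : Claim_equal_flatten_watchlist := by
  intro data _
  unfold Spec_flatten_watchlist flatten_watchlist flatten_watchlist_alt pvSections
  simp [List.flatMap_cons, pv_flatten_singleton]
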